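-- pv_equiv track=rewrite | github.com/jirikvita/delphesAnalysis | python/stackPlotItems.py | MakeMainKinemPlotItems
-- ===== SOURCE A (Python) =====
-- ChiKeys = [ '2B0S',
--             '1B1S',
--             '0B2S',
--             'AnySel']
--
-- def MakeMainKinemPlotItems(suff = '_denser'):
--     items = []
--     for topo in ChiKeys:
--         if topo == 'AnySel':
--             continue
--         items = items + [
--             [topo + '/ParticleDiTopPt' + suff,    topo + '/DetectorDiTopPt' + suff],
--             [topo + '/ParticleTop1Pt' + suff,   topo + '/DetectorTop1Pt' + suff],
--             [topo + '/ParticleTop2Pt' + suff,   topo + '/DetectorTop2Pt' + suff],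
--             [topo + '/ParticleTopPt' + suff,    topo + '/DetectorTopPt' + suff],
--
--             [topo + '/ParticleDiTopRapidity' + suff,    topo + '/DetectorDiTopRapidity' + suff],
--             [topo + '/ParticleTop1Rapidity' + suff,   topo + '/DetectorTop1Rapidity' + suff],
--             [topo + '/ParticleTop2Rapidity' + suff,   topo + '/DetectorTop2Rapidity' + suff],
--             [topo + '/ParticleTopRapidity' + suff,    topo + '/DetectorTopRapidity' + suff],
--         ]
--     return items
-- ===== SOURCE B (Python) =====
-- ChiKeys = [ '2B0S',
--             '1B1S',
--             '0B2S',
--             'AnySel']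
--
-- BASE_NAMES = ['DiTopPt', 'Top1Pt', 'Top2Pt', 'TopPt',
--               'DiTopRapidity', 'Top1Rapidity', 'Top2Rapidity', 'TopRapidity']
--
-- def MakeMainKinemPlotItems(suff = '_denser'):
--     return [[topo + '/Particle' + name + suff, topo + '/Detector' + name + suff]
--             for topo in ChiKeys if topo != 'AnySel'
--             for name in BASE_NAMES]
-- ===== Notes on version B (the rewrite author's own statement) =====
-- stated objective: simpler
-- what changed: Replaces the per-topology block of eight hand-written literal pairs (built by repeated list concatenation) with a data-driven nested comprehension over an ordered list of base variable names.
import Mathlib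
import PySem

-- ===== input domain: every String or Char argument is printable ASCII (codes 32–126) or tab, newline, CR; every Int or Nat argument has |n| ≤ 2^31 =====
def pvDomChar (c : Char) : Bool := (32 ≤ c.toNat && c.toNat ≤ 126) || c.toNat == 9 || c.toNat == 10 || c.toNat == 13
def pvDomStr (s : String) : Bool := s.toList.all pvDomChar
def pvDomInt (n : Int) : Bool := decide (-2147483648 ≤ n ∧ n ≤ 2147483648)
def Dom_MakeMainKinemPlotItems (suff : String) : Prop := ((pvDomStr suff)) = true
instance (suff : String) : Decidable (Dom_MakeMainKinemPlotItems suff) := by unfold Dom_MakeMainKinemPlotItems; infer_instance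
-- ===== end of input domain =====

-- ===== PORT A =====
-- B builds the same list data-driven from a base-name list instead of literal pairs (simpler decomposition).
def ChiKeys : List String := ["2B0S", "1B1S", "0B2S", "AnySel"]

def MakeMainKinemPlotItems (suff : String) : List (List String) :=
  ChiKeys.foldl (fun items topo =>
    if topo == "AnySel" then items
    else items ++ [
      [topo ++ "/ParticleDiTopPt" ++ suff,    topo ++ "/DetectorDiTopPt" ++ suff],
      [topo ++ "/ParticleTop1Pt" ++ suff,   topo ++ "/DetectorTop1Pt" ++ suff],
      [topo ++ "/ParticleTop2Pt" ++ suff,   topo ++ "/DetectorTop2Pt" ++ suff],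
      [topo ++ "/ParticleTopPt" ++ suff,    topo ++ "/DetectorTopPt" ++ suff],
      [topo ++ "/ParticleDiTopRapidity" ++ suff,    topo ++ "/DetectorDiTopRapidity" ++ suff],
      [topo ++ "/ParticleTop1Rapidity" ++ suff,   topo ++ "/DetectorTop1Rapidity" ++ suff],
      [topo ++ "/ParticleTop2Rapidity" ++ suff,   topo ++ "/DetectorTop2Rapidity" ++ suff],
      [topo ++ "/ParticleTopRapidity" ++ suff,    topo ++ "/DetectorTopRapidity" ++ suff]]) []

-- ===== PORT B =====
def BaseNames : List String :=
  ["DiTopPt", "Top1Pt", "Top2Pt", "TopPt",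
   "DiTopRapidity", "Top1Rapidity", "Top2Rapidity", "TopRapidity"]

def MakeMainKinemPlotItems_alt (suff : String) : List (List String) :=
  (ChiKeys.filter (fun topo => topo != "AnySel")).flatMap (fun topo =>
    BaseNames.map (fun name =>
      [topo ++ "/Particle" ++ name ++ suff, topo ++ "/Detector" ++ name ++ suff]))

-- ===== PRECONDITION & SPEC =====
def Spec_MakeMainKinemPlotItems (suff : String) (out : List (List String)) : Prop := out = MakeMainKinemPlotItems_alt suff
instance (suff : String) (out : List (List String)) : Decidable (Spec_MakeMainKinemPlotItems suff out) := by unfold Spec_MakeMainKinemPlotItems; infer_instance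

-- ===== CLAIM (what is proved, stated in full; the proofs are below) =====
def Claim_equal_MakeMainKinemPlotItems : Prop := ∀ (suff : String), Dom_MakeMainKinemPlotItems suff → Spec_MakeMainKinemPlotItems suff (MakeMainKinemPlotItems suff)

-- ===== LEMMAS AND PROOFS =====

-- ===== VERDICT (by name: the statement is the Claim_ definition above) =====
theorem MakeMainKinemPlotItems_spec : Claim_equal_MakeMainKinemPlotItems := by
  intro suff _
  unfold Spec_MakeMainKinemPlotItems
  simp [MakeMainKinemPlotItems, MakeMainKinemPlotItems_alt, ChiKeys, BaseNames,
    List.foldl, List.filter, List.flatMap]
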